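-- pv_equiv track=rewrite | github.com/gaojuhao2002/ML_course | 作业/作业10分类算法比较/read_data.py | count_3or5_month
-- ===== SOURCE A (Python) =====
-- def count_3or5_month(data_per_month,type_):
--     #type_是选择3或5
--     #下面这个循环分成每type_月一组
--     res={}
--     temp = []
--     for ind,(k,v) in enumerate(data_per_month.items(),1):
--         start_data= k if ind //type_ else None#开始的日期，或者定义为其他的日期，看需求也可以不要
--         temp.append(v)
--         if len(temp)==type_:#达到对应组长度
--             res[start_data]=temp
--             temp=[]# 清空，获取下一组
--     return res
-- ===== SOURCE B (Python) =====
-- def count_3or5_month(data_per_month, type_):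
--     # Slice-based regrouping: compute the number of complete groups up front,
--     # then cut each group out of the item list directly (no streaming temp buffer).
--     items = list(data_per_month.items())
--     if not items:
--         return {}
--     res = {}
--     ng = len(items) // type_   # ZeroDivisionError for type_ == 0, like the original
--     for g in range(ng):
--         chunk = items[g * type_:(g + 1) * type_]
--         res[chunk[-1][0]] = [v for _, v in chunk]
--     return res
-- ===== Notes on version B (the rewrite author's own statement) =====
-- stated objective: alternative
-- what changed: Replaces A's streaming temp-accumulator (enumerate with a buffer flushed each time it reaches type_) by up-front boundary computation: number of complete groups = len//type_, then each group is cut out by slicing and keyed by its last element.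
import Mathlib
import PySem

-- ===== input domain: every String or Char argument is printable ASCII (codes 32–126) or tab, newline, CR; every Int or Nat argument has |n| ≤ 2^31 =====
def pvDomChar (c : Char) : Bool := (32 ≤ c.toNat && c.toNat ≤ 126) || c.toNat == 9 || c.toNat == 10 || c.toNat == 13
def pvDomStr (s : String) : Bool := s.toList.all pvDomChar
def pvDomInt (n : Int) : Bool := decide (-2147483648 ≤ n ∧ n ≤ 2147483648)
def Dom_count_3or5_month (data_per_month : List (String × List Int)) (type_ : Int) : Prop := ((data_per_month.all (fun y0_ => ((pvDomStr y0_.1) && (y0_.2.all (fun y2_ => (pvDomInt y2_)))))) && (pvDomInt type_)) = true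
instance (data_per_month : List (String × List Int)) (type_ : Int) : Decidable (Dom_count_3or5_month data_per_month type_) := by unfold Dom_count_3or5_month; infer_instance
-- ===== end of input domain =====

-- B regroups dict items by computing the number of complete groups up front and slicing,
-- instead of A's streaming temp buffer; same cost (objective: alternative decomposition).

-- ===== PORT A =====
-- loop body of A: ind is the 1-based enumerate index; start_data = k if ind//type_ else None.
-- The None key is unreachable under Pre_ (a group only completes when type_ ≥ 1, and then ind//type_ ≥ 1),
-- so the dict keys stay String; ported as Option with getD "".
def stepA (type_ : Int) (st : PySem.Dict String (List (List Int)) × List (List Int))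
    (p : Int × (String × List Int)) : PySem.Dict String (List (List Int)) × List (List Int) :=
  let start_data : Option String := if PySem.Int.floordiv p.1 type_ ≠ 0 then some p.2.1 else none
  let temp := st.2 ++ [p.2.2]
  if (temp.length : Int) = type_ then (st.1.insert (start_data.getD "") temp, [])
  else (st.1, temp)

def count_3or5_month (data_per_month : List (String × List Int)) (type_ : Int) :
    List (String × List (List Int)) :=
  ((PySem.List.enumerate data_per_month 1).foldl (stepA type_)
    ((PySem.Dict.empty : PySem.Dict String (List (List Int))), [])).1.items

-- ===== PORT B =====
-- loop body of B: chunk = items[g*type_:(g+1)*type_]; res[chunk[-1][0]] = [v for _, v in chunk].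
-- chunk[-1] is ported as pyGetD chunk (-1) (chunk is nonempty for every g in range(ng)).
def stepB (items : List (String × List Int)) (type_ : Int)
    (res : PySem.Dict String (List (List Int))) (g : Int) : PySem.Dict String (List (List Int)) :=
  let chunk := PySem.List.slice items (some (g * type_)) (some ((g + 1) * type_))
  res.insert (PySem.List.pyGetD chunk (-1) ("", [])).1 (chunk.map Prod.snd)

def count_3or5_month_alt (data_per_month : List (String × List Int)) (type_ : Int) :
    List (String × List (List Int)) :=
  if data_per_month = [] then []
  else  -- ng = len(items) // type_
    ((PySem.List.pyRange 0 (PySem.Int.floordiv (data_per_month.length : Int) type_) 1).foldl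
      (stepB data_per_month type_)
      (PySem.Dict.empty : PySem.Dict String (List (List Int)))).items

-- ===== PRECONDITION & SPEC =====
-- Pre_ excludes only the ZeroDivisionError: type_ == 0 with a nonempty dict (both A and B raise there).
def Pre_count_3or5_month (data_per_month : List (String × List Int)) (type_ : Int) : Prop :=
  data_per_month = [] ∨ type_ ≠ 0
instance (data_per_month : List (String × List Int)) (type_ : Int) :
    Decidable (Pre_count_3or5_month data_per_month type_) := by
  unfold Pre_count_3or5_month; infer_instance

def pvWitness_count_3or5_month : (List (String × List Int)) × Int :=
  ([("jan", [1, 2]), ("feb", [3]), ("mar", [4]), ("apr", [5])], 3)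

def Spec_count_3or5_month (data_per_month : List (String × List Int)) (type_ : Int)
    (out : List (String × List (List Int))) : Prop := out = count_3or5_month_alt data_per_month type_
instance (data_per_month : List (String × List Int)) (type_ : Int)
    (out : List (String × List (List Int))) : Decidable (Spec_count_3or5_month data_per_month type_ out) := by
  unfold Spec_count_3or5_month; infer_instance

-- ===== CLAIM (what is proved, stated in full; the proofs are below) =====
def Claim_equal_count_3or5_month : Prop := ∀ (data_per_month : List (String × List Int)) (type_ : Int), Dom_count_3or5_month data_per_month type_ → Pre_count_3or5_month data_per_month type_ → Spec_count_3or5_month data_per_month type_ (count_3or5_month data_per_month type_)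

-- ===== LEMMAS AND PROOFS =====

-- Common reference function: consume complete groups of size t from the front.
def groupsRef (t : Nat) (l : List (String × List Int)) (d : PySem.Dict String (List (List Int))) :
    PySem.Dict String (List (List Int)) :=
  if _h : 0 < t ∧ t ≤ l.length then
    groupsRef t (l.drop t)
      (d.insert ((l.take t).getLastD ("", [])).1 ((l.take t).map Prod.snd))
  else d
termination_by l.length
decreasing_by simp; omega

lemma enumerate_append (xs ys : List (String × List Int)) (s : Int) :
    PySem.List.enumerate (xs ++ ys) s
      = PySem.List.enumerate xs s ++ PySem.List.enumerate ys (s + xs.length) := by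
  induction xs generalizing s with
  | nil => simp [PySem.List.enumerate_nil]
  | cons x xs ih =>
      simp only [List.cons_append, PySem.List.enumerate_cons, ih, List.length_cons]
      congr 2
      push_cast
      ring_nf

-- A's fold never completes a group while type_ < 0 (or while fewer than the needed elements remain).
lemma foldA_no_complete (type_ : Int) (l : List (String × List Int)) :
    ∀ (s : Int) (d : PySem.Dict String (List (List Int))) (temp : List (List Int)),
    (temp.length : Int) + l.length < type_ ∨ type_ < 0 →
    (PySem.List.enumerate l s).foldl (stepA type_) (d, temp)
      = (d, temp ++ l.map Prod.snd) := by
  induction l with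
  | nil => intro s d temp _; simp [PySem.List.enumerate_nil]
  | cons x l ih =>
      intro s d temp h
      rw [PySem.List.enumerate_cons, List.foldl_cons]
      have hstep : stepA type_ (d, temp) (s, x) = (d, temp ++ [x.2]) := by
        have hc : ¬ ((temp.length : Int) + 1 = type_) := by
          simp only [List.length_cons] at h
          push_cast at h ⊢
          omega
        simp [stepA, hc]
      rw [hstep, ih (s + 1) d (temp ++ [x.2]) (by
        simp only [List.length_append, List.length_cons, List.length_nil] at h ⊢
        push_cast at h ⊢
        omega)]
      simp

-- One complete chunk: fold over c with buffer temp, temp.length + c.length = t, ends by inserting.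
lemma foldA_chunk (t : Nat) (c : List (String × List Int)) :
    ∀ (temp : List (List Int)) (d : PySem.Dict String (List (List Int))) (s : Int),
    temp.length + c.length = t → c ≠ [] →
    PySem.Int.floordiv (s + c.length - 1) t ≠ 0 →
    (PySem.List.enumerate c s).foldl (stepA (t : Int)) (d, temp)
      = (d.insert (c.getLastD ("", [])).1 (temp ++ c.map Prod.snd), []) := by
  induction c with
  | nil => intro _ _ _ _ hne _; exact absurd rfl hne
  | cons x c ih =>
      intro temp d s hlen _ hdiv
      rw [PySem.List.enumerate_cons, List.foldl_cons]
      cases c with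
      | nil =>
          have hc : ((temp.length : Int) + 1) = (t : Int) := by
            simp only [List.length_cons, List.length_nil] at hlen
            omega
          have hd : PySem.Int.floordiv s (t : Int) ≠ 0 := by
            simpa using hdiv
          simp [stepA, hc, hd, PySem.List.enumerate_nil]
      | cons y c =>
          have hc : ¬ ((temp.length : Int) + 1 = (t : Int)) := by
            simp only [List.length_cons] at hlen
            omega
          have harg : s + 1 + ((y :: c).length : Int) - 1 = s + ((x :: y :: c).length : Int) - 1 := by
            simp only [List.length_cons]
            push_cast
            ring
          have hrec := ih (temp ++ [x.2]) d (s + 1)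
            (by simp only [List.length_append, List.length_cons, List.length_nil] at hlen ⊢; omega)
            (by simp)
            (by rw [harg]; exact hdiv)
          have hstep : stepA (t : Int) (d, temp) (s, x) = (d, temp ++ [x.2]) := by
            simp [stepA, hc]
          rw [hstep, hrec]
          simp

lemma foldA_groups (t : Nat) (ht : 0 < t) (l : List (String × List Int)) :
    ∀ (j : Nat) (d : PySem.Dict String (List (List Int))),
    ((PySem.List.enumerate l ((j * t : Nat) + 1 : Int)).foldl (stepA (t : Int)) (d, [])).1
      = groupsRef t l d := by
  suffices H : ∀ (n : Nat) (l : List (String × List Int)), l.length = n →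
      ∀ (j : Nat) (d : PySem.Dict String (List (List Int))),
      ((PySem.List.enumerate l ((j * t : Nat) + 1 : Int)).foldl (stepA (t : Int)) (d, [])).1
        = groupsRef t l d by
    intro j d; exact H l.length l rfl j d
  intro n
  induction n using Nat.strong_induction_on with
  | _ n ihn =>
    intro l hlen j d
    subst hlen
    by_cases hlt : l.length < t
    · rw [foldA_no_complete (t : Int) l _ d [] (by simp; omega)]
      rw [groupsRef]
      rw [dif_neg (by omega)]
    · have hle : t ≤ l.length := by omega
      have htake : (l.take t).length = t := by simp [hle]
      conv_lhs => rw [← List.take_append_drop t l]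
      rw [enumerate_append, List.foldl_append]
      rw [foldA_chunk t (l.take t) [] d _ (by simp [htake])
        (by
          intro h0
          have h1 := congrArg List.length h0
          rw [htake] at h1
          simp at h1
          omega)
        (by
          rw [htake]
          have : ((j * t : Nat) : Int) + 1 + (t : Int) - 1 = (((j + 1) * t : Nat) : Int) := by
            push_cast; ring
          rw [this, PySem.Int.floordiv_natCast, Nat.mul_div_cancel _ ht]
          push_cast
          omega)]
      have hs : ((j * t : Nat) : Int) + 1 + ((l.take t).length : Int)
          = (((j + 1) * t : Nat) : Int) + 1 := by
        rw [htake]; push_cast; ring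
      rw [hs]
      rw [ihn (l.length - t) (by omega) (l.drop t) (by simp) (j + 1) _]
      conv_rhs => rw [groupsRef]
      rw [dif_pos ⟨ht, hle⟩, List.nil_append]

-- Nat-shaped version of B's loop.
lemma foldB_nat (t : Nat) (ht : 0 < t) :
    ∀ (n : Nat) (l : List (String × List Int)) (d : PySem.Dict String (List (List Int))),
    n = l.length / t →
    (List.range n).foldl
      (fun d g => d.insert (((l.drop (g * t)).take t).getLastD ("", [])).1
        (((l.drop (g * t)).take t).map Prod.snd)) d
      = groupsRef t l d := by
  intro n
  induction n with
  | zero =>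
      intro l d h
      rw [List.range_zero, List.foldl_nil, groupsRef, dif_neg]
      intro hc
      have := (Nat.one_le_div_iff ht).mpr hc.2
      omega
  | succ n ih =>
      intro l d h
      have hle : t ≤ l.length := by
        by_contra hc
        rw [Nat.div_eq_of_lt (by omega)] at h
        omega
      rw [List.range_succ_eq_map, List.foldl_cons, List.foldl_map]
      simp only [Nat.zero_mul, List.drop_zero]
      have hfun : (fun (d : PySem.Dict String (List (List Int))) (g : Nat) =>
            d.insert (((l.drop ((g + 1) * t)).take t).getLastD ("", [])).1
              (((l.drop ((g + 1) * t)).take t).map Prod.snd))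
          = (fun (d : PySem.Dict String (List (List Int))) (g : Nat) =>
            d.insert ((((l.drop t).drop (g * t)).take t).getLastD ("", [])).1
              ((((l.drop t).drop (g * t)).take t).map Prod.snd)) := by
        funext d g
        rw [List.drop_drop]
        have : t + g * t = (g + 1) * t := by ring
        rw [this]
      rw [hfun, ih (l.drop t) _ (by
        have h2 := Nat.add_div_right (l.length - t) ht
        rw [Nat.sub_add_cancel hle] at h2
        simp only [List.length_drop]
        omega)]
      conv_rhs => rw [groupsRef]
      rw [dif_pos ⟨ht, hle⟩]

lemma foldB_groups (t : Nat) (ht : 0 < t) (l : List (String × List Int))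
    (d : PySem.Dict String (List (List Int))) :
    (PySem.List.pyRange 0 (PySem.Int.floordiv (l.length : Int) (t : Int)) 1).foldl
      (stepB l (t : Int)) d = groupsRef t l d := by
  rw [PySem.Int.floordiv_natCast, PySem.List.pyRange_zero_nat, List.foldl_map]
  rw [← foldB_nat t ht (l.length / t) l d rfl]
  apply PySem.List.foldl_congr_mem
  intro d g hg
  have hg' : g < l.length / t := by
    have := List.mem_range.mp (by simpa using hg)
    omega
  have hchunk : PySem.List.slice l (some ((g : Int) * (t : Int))) (some (((g : Int) + 1) * (t : Int)))
      = (l.drop (g * t)).take t := by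
    have h1 : ((g : Int) * (t : Int)) = ((g * t : Nat) : Int) := by push_cast; ring
    have h2 : (((g : Int) + 1) * (t : Int)) = ((g * t + t : Nat) : Int) := by push_cast; ring
    rw [h1, h2, PySem.List.slice_natCast]
    congr 1
    omega
  have hne : (l.drop (g * t)).take t ≠ [] := by
    have hmul : (g + 1) * t ≤ l.length := (Nat.le_div_iff_mul_le ht).mp (by omega)
    intro h0
    have := congrArg List.length h0
    simp only [List.length_take, List.length_drop, List.length_nil] at this
    have : min t (l.length - g * t) = 0 := this
    have : (g + 1) * t = g * t + t := by ring
    omega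
  rw [stepB, hchunk]
  simp only [PySem.List.pyGetD_neg_one _ _ hne, List.getLastD_eq_getLast?,
    List.getLast?_eq_some_getLast hne, Option.getD_some]

lemma floordiv_nonpos_of_neg (a b : Int) (ha : 0 ≤ a) (hb : b < 0) :
    PySem.Int.floordiv a b ≤ 0 := by
  have h1 := PySem.Int.floordiv_mul_add_mod a b
  have h2 := PySem.Int.mod_neg_bounds a hb
  nlinarith [h2.1, h2.2]

-- ===== VERDICT (by name: the statement is the Claim_ definition above) =====
theorem count_3or5_month_spec : Claim_equal_count_3or5_month := by
  intro data type_ _ hpre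
  unfold Spec_count_3or5_month count_3or5_month count_3or5_month_alt
  by_cases hnil : data = []
  · subst hnil
    simp [PySem.List.enumerate_nil]
    rfl
  · rw [if_neg hnil]
    have htz : type_ ≠ 0 := hpre.resolve_left hnil
    rcases lt_or_gt_of_ne htz with hneg | hpos
    · rw [foldA_no_complete type_ data 1 PySem.Dict.empty [] (Or.inr hneg)]
      have hng := floordiv_nonpos_of_neg (data.length : Int) type_ (by positivity) hneg
      rw [PySem.List.pyRange_one_eq_nil hng, List.foldl_nil]
    · obtain ⟨t, rfl⟩ : ∃ t : Nat, type_ = (t : Int) :=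
        ⟨type_.toNat, (Int.toNat_of_nonneg (le_of_lt hpos)).symm⟩
      have ht : 0 < t := by exact_mod_cast hpos
      have h1 : (1 : Int) = ((0 * t : Nat) : Int) + 1 := by simp
      conv_lhs => rw [h1]
      rw [foldA_groups t ht data 0 PySem.Dict.empty, foldB_groups t ht data PySem.Dict.empty]
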